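-- pv_equiv track=rewrite | github.com/Yoann-Merle/AOC | 2019/25/program.py | calculateMap
-- ===== SOURCE A (Python) =====
-- def calculateMap(feed):
--         c = 0
--         l = 0
--         mapping = {}
--         for f in feed:
--                 if f == 10:
--                         c = 0
--                         l += 1
--                 elif f in [35, 46, 94, 60, 62, 118]: # #,.,^,<,>,v
--                         mapping[(c,l)] = f
--                         c += 1
--         return mapping
-- ===== SOURCE B (Python) =====
-- def calculateMap(feed):
--         lines = []
--         cur = []
--         for f in feed:
--                 if f == 10:
--                         lines.append(cur)
--                         cur = []
--                 else:
--                         cur.append(f)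
--         lines.append(cur)
--         mapping = {}
--         l = 0
--         for line in lines:
--                 c = 0
--                 for f in line:
--                         if f in (35, 46, 94, 60, 62, 118):
--                                 mapping[(c, l)] = f
--                                 c += 1
--                 l += 1
--         return mapping
-- ===== Notes on version B (the rewrite author's own statement) =====
-- stated objective: alternative
-- what changed: Replaces A's single scan that threads a (column,line) counter pair and resets on newline with a two-phase decomposition: first group the byte feed into newline-separated lines, then a nested pass over lines with a fresh column counter per line.
import Mathlib
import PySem

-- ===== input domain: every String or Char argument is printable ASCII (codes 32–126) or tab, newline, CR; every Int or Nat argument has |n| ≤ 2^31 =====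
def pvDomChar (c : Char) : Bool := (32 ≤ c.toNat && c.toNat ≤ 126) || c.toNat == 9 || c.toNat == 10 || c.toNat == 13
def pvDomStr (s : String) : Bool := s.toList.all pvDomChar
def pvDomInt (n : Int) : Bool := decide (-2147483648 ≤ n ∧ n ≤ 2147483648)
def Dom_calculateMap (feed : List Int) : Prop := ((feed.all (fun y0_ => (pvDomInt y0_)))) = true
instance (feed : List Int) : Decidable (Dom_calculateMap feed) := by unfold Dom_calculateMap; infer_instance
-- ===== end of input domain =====

-- B groups the feed into newline-separated lines first and then runs a nested per-line pass,
-- instead of A's single scan threading a (column, line) counter pair; same cost (alternative decomposition).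

-- ===== PORT A =====
-- f in [35, 46, 94, 60, 62, 118]  (shared by both Pythons' membership tests)
def pvValid (f : Int) : Bool := ([35, 46, 94, 60, 62, 118] : List Int).contains f

def stepA (s : Int × Int × PySem.Dict (Int × Int) Int) (f : Int) :
    Int × Int × PySem.Dict (Int × Int) Int :=
  if f = 10 then (0, s.2.1 + 1, s.2.2)
  else if pvValid f then (s.1 + 1, s.2.1, s.2.2.insert (s.1, s.2.1) f)
  else s

def calculateMap (feed : List Int) : List (Int × Int × Int) :=
  ((feed.foldl stepA (0, 0, PySem.Dict.empty)).2.2.items).map (fun p => (p.1.1, p.1.2, p.2))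

-- ===== PORT B =====
def stepSplit (s : List (List Int) × List Int) (f : Int) : List (List Int) × List Int :=
  if f = 10 then (s.1 ++ [s.2], ([] : List Int)) else (s.1, s.2 ++ [f])

def stepInner (l : Int) (t : Int × PySem.Dict (Int × Int) Int) (f : Int) :
    Int × PySem.Dict (Int × Int) Int :=
  if pvValid f then (t.1 + 1, t.2.insert (t.1, l) f) else t

def stepOuter (s : Int × PySem.Dict (Int × Int) Int) (line : List Int) :
    Int × PySem.Dict (Int × Int) Int :=
  (s.1 + 1, (line.foldl (stepInner s.1) (0, s.2)).2)

def calculateMap_alt (feed : List Int) : List (Int × Int × Int) :=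
  let p := feed.foldl stepSplit ([], [])
  ((((p.1 ++ [p.2]).foldl stepOuter (0, PySem.Dict.empty)).2.items).map
    (fun q => (q.1.1, q.1.2, q.2)))

-- ===== PRECONDITION & SPEC =====
def Spec_calculateMap (feed : List Int) (out : List (Int × Int × Int)) : Prop := out = calculateMap_alt feed
instance (feed : List Int) (out : List (Int × Int × Int)) : Decidable (Spec_calculateMap feed out) := by unfold Spec_calculateMap; infer_instance

-- ===== CLAIM (what is proved, stated in full; the proofs are below) =====
def Claim_equal_calculateMap : Prop := ∀ (feed : List Int), Dom_calculateMap feed → Spec_calculateMap feed (calculateMap feed)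

-- ===== LEMMAS AND PROOFS =====

-- split the feed on byte 10: (first line, remaining lines)
def splitNL : List Int → List Int × List (List Int)
  | [] => ([], [])
  | f :: fs =>
    let r := splitNL fs
    if f = 10 then ([], r.1 :: r.2) else (f :: r.1, r.2)

-- the items A's (resp. B's inner) loop appends, as a pure list
def emitRow (l : Int) (c : Int) : List Int → List ((Int × Int) × Int)
  | [] => []
  | f :: fs => if pvValid f then ((c, l), f) :: emitRow l (c + 1) fs else emitRow l c fs

def emitA (c l : Int) : List Int → List ((Int × Int) × Int)
  | [] => []
  | f :: fs =>
    if f = 10 then emitA 0 (l + 1) fs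
    else if pvValid f then ((c, l), f) :: emitA (c + 1) l fs
    else emitA c l fs

def bEmit (l : Int) : List (List Int) → List ((Int × Int) × Int)
  | [] => []
  | line :: rest => emitRow l 0 line ++ bEmit (l + 1) rest

theorem fresh_key (d : PySem.Dict (Int × Int) Int) (c l : Int)
    (h : ∀ k ∈ d.keys, k.2 < l ∨ (k.2 = l ∧ k.1 < c)) :
    d.contains (c, l) = false := by
  by_contra hc
  have : (c, l) ∈ d.keys := by
    rw [← PySem.Dict.contains_iff_mem_keys]
    simpa using hc
  rcases h _ this with h' | h' <;> omega

theorem foldA_items (feed : List Int) :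
    ∀ (c l : Int) (d : PySem.Dict (Int × Int) Int),
      (∀ k ∈ d.keys, k.2 < l ∨ (k.2 = l ∧ k.1 < c)) →
      (feed.foldl stepA (c, l, d)).2.2.items = d.items ++ emitA c l feed := by
  induction feed with
  | nil => intro c l d _; simp [emitA]
  | cons f fs ih =>
    intro c l d hinv
    by_cases h10 : f = 10
    · subst h10
      have : ∀ k ∈ d.keys, k.2 < l + 1 ∨ (k.2 = l + 1 ∧ k.1 < 0) := by
        intro k hk; rcases hinv k hk with h | h <;> omega
      simp [List.foldl_cons, stepA, emitA, ih 0 (l + 1) d this]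
    · by_cases hv : pvValid f
      · have hfresh := fresh_key d c l hinv
        have hinv' : ∀ k ∈ (d.insert (c, l) f).keys, k.2 < l ∨ (k.2 = l ∧ k.1 < c + 1) := by
          intro k hk
          rcases (PySem.Dict.mem_keys_insert _ _ _ _).1 hk with rfl | hk'
          · right; exact ⟨rfl, by omega⟩
          · rcases hinv k hk' with h | h
            · exact Or.inl h
            · exact Or.inr ⟨h.1, by omega⟩
        simp [List.foldl_cons, stepA, h10, hv, emitA,
          ih (c + 1) l _ hinv', PySem.Dict.items_insert_of_not_contains _ _ hfresh]
      · simp [List.foldl_cons, stepA, h10, hv, emitA, ih c l d hinv]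

theorem foldInner_items (line : List Int) (l : Int) :
    ∀ (c : Int) (d : PySem.Dict (Int × Int) Int),
      (∀ k ∈ d.keys, k.2 < l ∨ (k.2 = l ∧ k.1 < c)) →
      (line.foldl (stepInner l) (c, d)).2.items = d.items ++ emitRow l c line ∧
      (∀ k ∈ (line.foldl (stepInner l) (c, d)).2.keys,
        k.2 < l ∨ (k.2 = l ∧ k.1 < (line.foldl (stepInner l) (c, d)).1)) := by
  induction line with
  | nil => intro c d hinv; exact ⟨by simp [emitRow], hinv⟩
  | cons f fs ih =>
    intro c d hinv
    by_cases hv : pvValid f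
    · have hfresh := fresh_key d c l hinv
      have hinv' : ∀ k ∈ (d.insert (c, l) f).keys, k.2 < l ∨ (k.2 = l ∧ k.1 < c + 1) := by
        intro k hk
        rcases (PySem.Dict.mem_keys_insert _ _ _ _).1 hk with rfl | hk'
        · right; exact ⟨rfl, by omega⟩
        · rcases hinv k hk' with h | h
          · exact Or.inl h
          · exact Or.inr ⟨h.1, by omega⟩
      have := ih (c + 1) (d.insert (c, l) f) hinv'
      refine ⟨?_, by simpa [List.foldl_cons, stepInner, hv] using this.2⟩
      simp [List.foldl_cons, stepInner, hv, emitRow, this.1,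
        PySem.Dict.items_insert_of_not_contains _ _ hfresh]
    · have := ih c d hinv
      exact ⟨by simp [List.foldl_cons, stepInner, hv, emitRow, this.1],
        by simpa [List.foldl_cons, stepInner, hv] using this.2⟩

theorem foldOuter_items (lines : List (List Int)) :
    ∀ (l : Int) (d : PySem.Dict (Int × Int) Int),
      (∀ k ∈ d.keys, k.2 < l) →
      (lines.foldl stepOuter (l, d)).2.items = d.items ++ bEmit l lines := by
  induction lines with
  | nil => intro l d _; simp [bEmit]
  | cons line rest ih =>
    intro l d hinv
    have hin : ∀ k ∈ d.keys, k.2 < l ∨ (k.2 = l ∧ k.1 < 0) := fun k hk => Or.inl (hinv k hk)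
    have h1 := foldInner_items line l 0 d hin
    have hnext : ∀ k ∈ (line.foldl (stepInner l) (0, d)).2.keys, k.2 < l + 1 := by
      intro k hk; rcases h1.2 k hk with h | h <;> omega
    simp [List.foldl_cons, stepOuter, bEmit, ih (l + 1) _ hnext, h1.1]

theorem split_fold (feed : List Int) :
    ∀ (lines0 : List (List Int)) (cur0 : List Int),
      (feed.foldl stepSplit (lines0, cur0)).1 ++ [(feed.foldl stepSplit (lines0, cur0)).2] =
        lines0 ++ (cur0 ++ (splitNL feed).1) :: (splitNL feed).2 := by
  induction feed with
  | nil => intro lines0 cur0; simp [splitNL]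
  | cons f fs ih =>
    intro lines0 cur0
    by_cases h10 : f = 10
    · simp [List.foldl_cons, stepSplit, h10, splitNL, ih (lines0 ++ [cur0]) []]
    · simp [List.foldl_cons, stepSplit, h10, splitNL, ih lines0 (cur0 ++ [f])]

theorem emitA_eq (feed : List Int) :
    ∀ (c l : Int),
      emitA c l feed = emitRow l c (splitNL feed).1 ++ bEmit (l + 1) (splitNL feed).2 := by
  induction feed with
  | nil => intro c l; simp [splitNL, emitA, emitRow, bEmit]
  | cons f fs ih =>
    intro c l
    by_cases h10 : f = 10
    · simp [emitA, h10, splitNL, ih 0 (l + 1), emitRow, bEmit]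
    · by_cases hv : pvValid f
      · simp [emitA, h10, hv, splitNL, ih (c + 1) l, emitRow]
      · simp [emitA, h10, hv, splitNL, ih c l, emitRow]

-- ===== VERDICT (by name: the statement is the Claim_ definition above) =====
theorem calculateMap_spec : Claim_equal_calculateMap := by
  intro feed _
  unfold Spec_calculateMap calculateMap calculateMap_alt
  have hemp : ∀ k ∈ (PySem.Dict.empty : PySem.Dict (Int × Int) Int).keys,
      k.2 < (0 : Int) ∨ (k.2 = 0 ∧ k.1 < 0) := by simp [PySem.Dict.keys_empty]
  have hA := foldA_items feed 0 0 PySem.Dict.empty hemp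
  have hS := split_fold feed [] []
  have hB := foldOuter_items ((feed.foldl stepSplit ([], [])).1 ++
      [(feed.foldl stepSplit ([], [])).2]) 0 PySem.Dict.empty
    (by simp [PySem.Dict.keys_empty])
  simp only []
  rw [hA, hB, hS]
  simp [bEmit, emitA_eq feed 0 0]
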